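-- pv_equiv track=rewrite | github.com/abyanhussain21-sudo/Assembly_QC | BATC/assembly-qc/assembly_qc/statistics/assembly_stats.py | _length_distribution_summary
-- ===== SOURCE A (Python) =====
-- from typing import List
--
-- def _length_distribution_summary(lengths: List[int]) -> dict:
--     """Build an ordered dict of length-bucket → contig count for display.
--
--     Buckets are chosen to mirror common quality thresholds used in genome
--     assembly reports (e.g., >=500 bp is a common minimum for annotation).
--
--     Args:
--         lengths: Contig lengths (any order).
--
--     Returns:
--         Ordered dict mapping bucket label to count.
--     """
--     thresholds = [
--         (">= 10 Mbp",   10_000_000),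
--         (">= 1 Mbp",     1_000_000),
--         (">= 100 kbp",     100_000),
--         (">= 10 kbp",       10_000),
--         (">= 1 kbp",         1_000),
--         (">= 500 bp",          500),
--         ("< 500 bp",             0),
--     ]
--     counts: dict = {}
--     for label, threshold in thresholds:
--         if threshold == 0:
--             # Final bucket: everything below 500 bp
--             counts[label] = sum(1 for l in lengths if l < 500)
--         else:
--             counts[label] = sum(1 for l in lengths if l >= threshold)
--     return counts
-- ===== SOURCE B (Python) =====
-- from typing import List
--
-- def _length_distribution_summary(lengths: List[int]) -> dict:
--     """One pass: tally exact bands, then report cumulative '>= X' counts."""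
--     a = b = c = d = e = f = g = 0
--     for l in lengths:
--         if l >= 10_000_000:
--             a += 1
--         elif l >= 1_000_000:
--             b += 1
--         elif l >= 100_000:
--             c += 1
--         elif l >= 10_000:
--             d += 1
--         elif l >= 1_000:
--             e += 1
--         elif l >= 500:
--             f += 1
--         else:
--             g += 1
--     return {
--         ">= 10 Mbp": a,
--         ">= 1 Mbp": a + b,
--         ">= 100 kbp": a + b + c,
--         ">= 10 kbp": a + b + c + d,
--         ">= 1 kbp": a + b + c + d + e,
--         ">= 500 bp": a + b + c + d + e + f,
--         "< 500 bp": g,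
--     }
-- ===== Notes on version B (the rewrite author's own statement) =====
-- stated objective: faster
-- what changed: A scans the length list once per bucket (seven passes, one per threshold); B makes a single pass classifying each length into its exact band and then turns the 7-entry band histogram into the cumulative '>= X' counts with a fixed-size prefix sum.
import Mathlib
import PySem

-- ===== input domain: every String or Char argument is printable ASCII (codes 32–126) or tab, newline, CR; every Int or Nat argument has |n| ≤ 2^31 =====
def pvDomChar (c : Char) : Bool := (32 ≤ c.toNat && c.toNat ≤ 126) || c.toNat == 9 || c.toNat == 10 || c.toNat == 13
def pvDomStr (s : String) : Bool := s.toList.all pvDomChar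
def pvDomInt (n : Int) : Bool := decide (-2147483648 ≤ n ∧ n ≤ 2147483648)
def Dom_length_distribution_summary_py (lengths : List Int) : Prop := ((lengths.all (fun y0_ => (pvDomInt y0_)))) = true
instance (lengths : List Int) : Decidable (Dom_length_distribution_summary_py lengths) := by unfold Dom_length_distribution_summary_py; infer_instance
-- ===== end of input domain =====

-- B replaces A's seven scans of `lengths` by one pass tallying exact bands plus a fixed cumulative sum (objective: faster, constant factor).


-- ===== PORT A =====
def length_distribution_summary_py (lengths : List Int) : List (String × Int) :=
  let thresholds : List (String × Int) :=
    [(">= 10 Mbp", 10000000), (">= 1 Mbp", 1000000), (">= 100 kbp", 100000),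
     (">= 10 kbp", 10000), (">= 1 kbp", 1000), (">= 500 bp", 500), ("< 500 bp", 0)]
  let counts : PySem.Dict String Int :=
    thresholds.foldl (fun counts lt =>
      if lt.2 == 0 then
        counts.insert lt.1 (lengths.foldl (fun s l => if l < 500 then s + 1 else s) 0)
      else
        counts.insert lt.1 (lengths.foldl (fun s l => if l ≥ lt.2 then s + 1 else s) 0))
      PySem.Dict.empty
  counts.items

-- ===== PORT B =====
def length_distribution_summary_py_alt (lengths : List Int) : List (String × Int) :=
  let st :=
    lengths.foldl (fun (st : Int × Int × Int × Int × Int × Int × Int) (l : Int) =>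
      let (a, b, c, d, e, f, g) := st
      if l ≥ 10000000 then (a + 1, b, c, d, e, f, g)
      else if l ≥ 1000000 then (a, b + 1, c, d, e, f, g)
      else if l ≥ 100000 then (a, b, c + 1, d, e, f, g)
      else if l ≥ 10000 then (a, b, c, d + 1, e, f, g)
      else if l ≥ 1000 then (a, b, c, d, e + 1, f, g)
      else if l ≥ 500 then (a, b, c, d, e, f + 1, g)
      else (a, b, c, d, e, f, g + 1))
      (0, 0, 0, 0, 0, 0, 0)
  let (a, b, c, d, e, f, g) := st
  [(">= 10 Mbp", a), (">= 1 Mbp", a + b), (">= 100 kbp", a + b + c),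
   (">= 10 kbp", a + b + c + d), (">= 1 kbp", a + b + c + d + e),
   (">= 500 bp", a + b + c + d + e + f), ("< 500 bp", g)]

-- ===== PRECONDITION & SPEC =====
def Spec_length_distribution_summary_py (lengths : List Int) (out : List (String × Int)) : Prop := out = length_distribution_summary_py_alt lengths
instance (lengths : List Int) (out : List (String × Int)) : Decidable (Spec_length_distribution_summary_py lengths out) := by unfold Spec_length_distribution_summary_py; infer_instance

-- ===== CLAIM (what is proved, stated in full; the proofs are below) =====
def Claim_equal_length_distribution_summary_py : Prop := ∀ (lengths : List Int), Dom_length_distribution_summary_py lengths → Spec_length_distribution_summary_py lengths (length_distribution_summary_py lengths)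

-- ===== LEMMAS AND PROOFS =====

-- band predicates (exact band of B's if-chain)
def pvB1 (l : Int) : Bool := decide (10000000 ≤ l)
def pvB2 (l : Int) : Bool := decide (1000000 ≤ l ∧ l < 10000000)
def pvB3 (l : Int) : Bool := decide (100000 ≤ l ∧ l < 1000000)
def pvB4 (l : Int) : Bool := decide (10000 ≤ l ∧ l < 100000)
def pvB5 (l : Int) : Bool := decide (1000 ≤ l ∧ l < 10000)
def pvB6 (l : Int) : Bool := decide (500 ≤ l ∧ l < 1000)
def pvB7 (l : Int) : Bool := decide (l < 500)

-- A's counting generators as countP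
theorem pv_foldl_ge (t : Int) : ∀ (xs : List Int) (s : Int),
    xs.foldl (fun s l => if t ≤ l then s + 1 else s) s
      = s + (xs.countP (fun l => decide (t ≤ l)) : Int) := by
  intro xs
  induction xs with
  | nil => intro s; simp
  | cons x xs ih =>
    intro s
    simp only [List.foldl_cons, List.countP_cons, ih]
    by_cases h : t ≤ x <;> simp [h] <;> ring

theorem pv_foldl_lt : ∀ (xs : List Int) (s : Int),
    xs.foldl (fun s l => if l < 500 then s + 1 else s) s
      = s + (xs.countP pvB7 : Int) := by
  intro xs
  induction xs with
  | nil => intro s; simp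
  | cons x xs ih =>
    intro s
    simp only [List.foldl_cons, List.countP_cons, ih, pvB7]
    by_cases h : x < 500 <;> simp [h] <;> ring

-- B's one-pass fold computes the seven band counts
set_option maxHeartbeats 1000000 in
theorem pv_foldB : ∀ (xs : List Int) (a b c d e f g : Int),
    xs.foldl (fun (st : Int × Int × Int × Int × Int × Int × Int) (l : Int) =>
      let (a, b, c, d, e, f, g) := st
      if l ≥ 10000000 then (a + 1, b, c, d, e, f, g)
      else if l ≥ 1000000 then (a, b + 1, c, d, e, f, g)
      else if l ≥ 100000 then (a, b, c + 1, d, e, f, g)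
      else if l ≥ 10000 then (a, b, c, d + 1, e, f, g)
      else if l ≥ 1000 then (a, b, c, d, e + 1, f, g)
      else if l ≥ 500 then (a, b, c, d, e, f + 1, g)
      else (a, b, c, d, e, f, g + 1)) (a, b, c, d, e, f, g)
    = (a + (xs.countP pvB1 : Int), b + (xs.countP pvB2 : Int), c + (xs.countP pvB3 : Int),
       d + (xs.countP pvB4 : Int), e + (xs.countP pvB5 : Int), f + (xs.countP pvB6 : Int),
       g + (xs.countP pvB7 : Int)) := by
  intro xs
  induction xs with
  | nil => intro a b c d e f g; simp
  | cons x xs ih =>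
    intro a b c d e f g
    rw [List.foldl_cons]
    have hred : (match (a, b, c, d, e, f, g) with
      | (a, b, c, d, e, f, g) =>
        if x ≥ 10000000 then (a + 1, b, c, d, e, f, g)
        else if x ≥ 1000000 then (a, b + 1, c, d, e, f, g)
        else if x ≥ 100000 then (a, b, c + 1, d, e, f, g)
        else if x ≥ 10000 then (a, b, c, d + 1, e, f, g)
        else if x ≥ 1000 then (a, b, c, d, e + 1, f, g)
        else if x ≥ 500 then (a, b, c, d, e, f + 1, g)
        else (a, b, c, d, e, f, g + 1) : Int × Int × Int × Int × Int × Int × Int)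
      = (if x ≥ 10000000 then (a + 1, b, c, d, e, f, g)
        else if x ≥ 1000000 then (a, b + 1, c, d, e, f, g)
        else if x ≥ 100000 then (a, b, c + 1, d, e, f, g)
        else if x ≥ 10000 then (a, b, c, d + 1, e, f, g)
        else if x ≥ 1000 then (a, b, c, d, e + 1, f, g)
        else if x ≥ 500 then (a, b, c, d, e, f + 1, g)
        else (a, b, c, d, e, f, g + 1)) := rfl
    rw [hred]
    by_cases h1 : x ≥ 10000000
    · rw [if_pos h1, ih]
      simp only [List.countP_cons, Prod.mk.injEq, pvB1, pvB2, pvB3, pvB4, pvB5, pvB6, pvB7,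
        decide_eq_true_eq]
      split_ifs <;> omega
    · rw [if_neg h1]
      by_cases h2 : x ≥ 1000000
      · rw [if_pos h2, ih]
        simp only [List.countP_cons, Prod.mk.injEq, pvB1, pvB2, pvB3, pvB4, pvB5, pvB6, pvB7,
          decide_eq_true_eq]
        split_ifs <;> omega
      · rw [if_neg h2]
        by_cases h3 : x ≥ 100000
        · rw [if_pos h3, ih]
          simp only [List.countP_cons, Prod.mk.injEq, pvB1, pvB2, pvB3, pvB4, pvB5, pvB6, pvB7,
            decide_eq_true_eq]
          split_ifs <;> omega
        · rw [if_neg h3]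
          by_cases h4 : x ≥ 10000
          · rw [if_pos h4, ih]
            simp only [List.countP_cons, Prod.mk.injEq, pvB1, pvB2, pvB3, pvB4, pvB5, pvB6, pvB7,
              decide_eq_true_eq]
            split_ifs <;> omega
          · rw [if_neg h4]
            by_cases h5 : x ≥ 1000
            · rw [if_pos h5, ih]
              simp only [List.countP_cons, Prod.mk.injEq, pvB1, pvB2, pvB3, pvB4, pvB5, pvB6, pvB7,
                decide_eq_true_eq]
              split_ifs <;> omega
            · rw [if_neg h5]
              by_cases h6 : x ≥ 500
              · rw [if_pos h6, ih]
                simp only [List.countP_cons, Prod.mk.injEq, pvB1, pvB2, pvB3, pvB4, pvB5, pvB6, pvB7,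
                  decide_eq_true_eq]
                split_ifs <;> omega
              · rw [if_neg h6, ih]
                simp only [List.countP_cons, Prod.mk.injEq, pvB1, pvB2, pvB3, pvB4, pvB5, pvB6, pvB7,
                  decide_eq_true_eq]
                split_ifs <;> omega

-- cumulative band sums give the overlapping '>= t' counts
theorem pv_e1 (xs : List Int) :
    xs.countP (fun l => decide (1000000 ≤ l)) = xs.countP pvB1 + xs.countP pvB2 := by
  induction xs with
  | nil => simp
  | cons x xs ih =>
    simp only [List.countP_cons, ih, pvB1, pvB2, decide_eq_true_eq]
    split_ifs <;> omega

theorem pv_e2 (xs : List Int) :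
    xs.countP (fun l => decide (100000 ≤ l)) = xs.countP (fun l => decide (1000000 ≤ l)) + xs.countP pvB3 := by
  induction xs with
  | nil => simp
  | cons x xs ih =>
    simp only [List.countP_cons, ih, pvB3, decide_eq_true_eq]
    split_ifs <;> omega

theorem pv_e3 (xs : List Int) :
    xs.countP (fun l => decide (10000 ≤ l)) = xs.countP (fun l => decide (100000 ≤ l)) + xs.countP pvB4 := by
  induction xs with
  | nil => simp
  | cons x xs ih =>
    simp only [List.countP_cons, ih, pvB4, decide_eq_true_eq]
    split_ifs <;> omega

theorem pv_e4 (xs : List Int) :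
    xs.countP (fun l => decide (1000 ≤ l)) = xs.countP (fun l => decide (10000 ≤ l)) + xs.countP pvB5 := by
  induction xs with
  | nil => simp
  | cons x xs ih =>
    simp only [List.countP_cons, ih, pvB5, decide_eq_true_eq]
    split_ifs <;> omega

theorem pv_e5 (xs : List Int) :
    xs.countP (fun l => decide (500 ≤ l)) = xs.countP (fun l => decide (1000 ≤ l)) + xs.countP pvB6 := by
  induction xs with
  | nil => simp
  | cons x xs ih =>
    simp only [List.countP_cons, ih, pvB6, decide_eq_true_eq]
    split_ifs <;> omega

-- items of A's literal seven-key insert chain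
theorem pv_items (c1 c2 c3 c4 c5 c6 c7 : Int) :
    (((((((PySem.Dict.empty.insert ">= 10 Mbp" c1).insert ">= 1 Mbp" c2).insert ">= 100 kbp" c3).insert
        ">= 10 kbp" c4).insert ">= 1 kbp" c5).insert ">= 500 bp" c6).insert "< 500 bp" c7).items
    = [(">= 10 Mbp", c1), (">= 1 Mbp", c2), (">= 100 kbp", c3), (">= 10 kbp", c4),
       (">= 1 kbp", c5), (">= 500 bp", c6), ("< 500 bp", c7)] := by
  simp [PySem.Dict.insert, PySem.Dict.empty, PySem.Dict.contains]

-- ===== VERDICT (by name: the statement is the Claim_ definition above) =====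
theorem length_distribution_summary_py_spec : Claim_equal_length_distribution_summary_py := by
  intro lengths _
  unfold Spec_length_distribution_summary_py
  unfold length_distribution_summary_py length_distribution_summary_py_alt
  simp only [List.foldl_cons, List.foldl_nil, beq_iff_eq]
  norm_num
  rw [pv_items, pv_foldB]
  have e1 := pv_e1 lengths
  have e2 := pv_e2 lengths
  have e3 := pv_e3 lengths
  have e4 := pv_e4 lengths
  have e5 := pv_e5 lengths
  simp only [pv_foldl_ge, pv_foldl_lt, zero_add, List.cons.injEq, Prod.mk.injEq,
    and_true, true_and]
  refine ⟨?_, ?_, ?_, ?_, ?_, ?_⟩ <;> unfold pvB1 at e1 ⊢ <;> omega
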